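-- pv_equiv track=rewrite | github.com/muitiiifruckt/tink | Tink/1.py | find_special_segment
-- ===== SOURCE A (Python) =====
-- def find_special_segment(n, grades):
--     if n<=6:
--         return -1
--     max_fives = 0
--     for i in range(n - 7 +1):
--         local_max_fives = how_fives(grades[i:i+7])
--         max_fives = max(local_max_fives,max_fives)
--         if max_fives == 7:
--             return max_fives
--     return max_fives if max_fives!=0 else -1
--
-- def how_fives(string):
--     fives = 0
--     for num in string:
--         if num==5:
--             fives +=1
--         elif num == 3 or num == 2:
--             return 0
--     return fives
-- ===== SOURCE B (Python) =====
-- def find_special_segment(n, grades):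
--     if n <= 6:
--         return -1
--     m = len(grades)
--     # prefix counts: p5[k] = fives in grades[:k], pbad[k] = 2s/3s in grades[:k]
--     p5 = [0]
--     pbad = [0]
--     s5 = 0
--     sb = 0
--     for g in grades:
--         s5 += 1 if g == 5 else 0
--         sb += 1 if g == 2 or g == 3 else 0
--         p5.append(s5)
--         pbad.append(sb)
--     best = 0
--     for i in range(min(n - 6, m)):
--         end = min(i + 7, m)
--         if pbad[end] == pbad[i]:
--             best = max(best, p5[end] - p5[i])
--     return best if best != 0 else -1
-- ===== Notes on version B (the rewrite author's own statement) =====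
-- stated objective: alternative
-- what changed: B replaces A's per-window slicing and rescanning (how_fives over grades[i:i+7] for every i) by two prefix-count arrays (fives and bad grades) built in one pass, valuing each window from prefix differences, with the window loop clamped to min(n-6, len(grades)) since windows starting past the end are empty.
import Mathlib
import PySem

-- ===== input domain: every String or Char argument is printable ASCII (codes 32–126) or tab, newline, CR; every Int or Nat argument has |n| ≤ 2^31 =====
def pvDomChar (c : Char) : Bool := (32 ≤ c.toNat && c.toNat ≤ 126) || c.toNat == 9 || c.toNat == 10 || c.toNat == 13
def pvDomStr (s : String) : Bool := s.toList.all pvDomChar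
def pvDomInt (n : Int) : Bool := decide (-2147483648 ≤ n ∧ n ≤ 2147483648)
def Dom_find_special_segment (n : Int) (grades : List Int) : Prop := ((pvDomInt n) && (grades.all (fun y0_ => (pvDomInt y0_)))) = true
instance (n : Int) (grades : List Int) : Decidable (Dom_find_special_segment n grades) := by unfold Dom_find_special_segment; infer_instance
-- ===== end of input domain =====

-- B values each window via prefix counts of fives/bad grades instead of A's per-window slice-and-rescan (alternative algorithm; same value everywhere).

-- ===== PORT A =====
def how_fives_loop (fives : Int) : List Int → Int
  | [] => fives
  | num :: rest =>
      if num = 5 then how_fives_loop (fives + 1) rest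
      else if num = 3 ∨ num = 2 then 0
      else how_fives_loop fives rest

def how_fives (s : List Int) : Int := how_fives_loop 0 s

def fss_loopA (grades : List Int) : List Int → Int → Int
  | [], max_fives => max_fives
  | i :: rest, max_fives =>
      let local_max_fives := how_fives (PySem.List.slice grades (some i) (some (i + 7)))
      let mx := max local_max_fives max_fives
      if mx = 7 then mx else fss_loopA grades rest mx

def find_special_segment (n : Int) (grades : List Int) : Int :=
  if n ≤ 6 then -1
  else
    let mx := fss_loopA grades (PySem.List.pyRange 0 (n - 7 + 1) 1) 0
    if mx ≠ 0 then mx else -1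

-- ===== PORT B =====
-- one step of the prefix-building loop: state (p5, pbad, s5, sb)
def fss_build (st : List Int × List Int × Int × Int) (g : Int) : List Int × List Int × Int × Int :=
  let s5 := st.2.2.1 + (if g = 5 then 1 else 0)
  let sb := st.2.2.2 + (if g = 2 ∨ g = 3 then 1 else 0)
  (st.1 ++ [s5], st.2.1 ++ [sb], s5, sb)

def find_special_segment_alt (n : Int) (grades : List Int) : Int :=
  if n ≤ 6 then -1
  else
    let m : Int := grades.length
    let st := grades.foldl fss_build ([0], [0], 0, 0)
    let p5 := st.1
    let pbad := st.2.1
    -- indices i and min(i+7,m) always lie within the prefix lists (length m+1); the 0 default is never used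
    let best := (PySem.List.pyRange 0 (min (n - 6) m) 1).foldl
      (fun best i =>
        let e := min (i + 7) m
        if PySem.List.pyGetD pbad e 0 = PySem.List.pyGetD pbad i 0
        then max best (PySem.List.pyGetD p5 e 0 - PySem.List.pyGetD p5 i 0)
        else best) 0
    if best ≠ 0 then best else -1

-- ===== PRECONDITION & SPEC =====
def Spec_find_special_segment (n : Int) (grades : List Int) (out : Int) : Prop := out = find_special_segment_alt n grades
instance (n : Int) (grades : List Int) (out : Int) : Decidable (Spec_find_special_segment n grades out) := by unfold Spec_find_special_segment; infer_instance

-- ===== CLAIM (what is proved, stated in full; the proofs are below) =====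
def Claim_equal_find_special_segment : Prop := ∀ (n : Int) (grades : List Int), Dom_find_special_segment n grades → Spec_find_special_segment n grades (find_special_segment n grades)

-- ===== LEMMAS AND PROOFS =====

/-- Int-valued count of fives. -/
def icnt5 : List Int → Int
  | [] => 0
  | x :: xs => (if x = 5 then 1 else 0) + icnt5 xs

/-- Int-valued count of bad grades (2 or 3). -/
def icntb : List Int → Int
  | [] => 0
  | x :: xs => (if x = 2 ∨ x = 3 then 1 else 0) + icntb xs

/-- value A assigns to the window starting at i -/
def winA (xs : List Int) (i : Int) : Int := how_fives (PySem.List.slice xs (some i) (some (i + 7)))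

/-- fold form of A's main loop without the early exit -/
def fmax (xs : List Int) (l : List Int) (mx : Int) : Int :=
  l.foldl (fun m i => max (winA xs i) m) mx

theorem icnt5_le_length (xs : List Int) : icnt5 xs ≤ xs.length := by
  induction xs with
  | nil => simp [icnt5]
  | cons x xs ih => simp only [icnt5, List.length_cons]; split <;> push_cast <;> omega

theorem icntb_nonneg (xs : List Int) : 0 ≤ icntb xs := by
  induction xs with
  | nil => simp [icntb]
  | cons x xs ih => simp only [icntb]; split <;> omega

theorem icnt5_append (xs ys : List Int) : icnt5 (xs ++ ys) = icnt5 xs + icnt5 ys := by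
  induction xs with
  | nil => simp [icnt5]
  | cons x xs ih => simp only [icnt5, List.cons_append, ih]; ring

theorem icntb_append (xs ys : List Int) : icntb (xs ++ ys) = icntb xs + icntb ys := by
  induction xs with
  | nil => simp [icntb]
  | cons x xs ih => simp only [icntb, List.cons_append, ih]; ring

theorem hf_char (w : List Int) (acc : Int) :
    how_fives_loop acc w = if icntb w = 0 then acc + icnt5 w else 0 := by
  induction w generalizing acc with
  | nil => simp [how_fives_loop, icntb, icnt5]
  | cons x xs ih =>
      have hb := icntb_nonneg xs
      simp only [how_fives_loop, icntb, icnt5]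
      by_cases h5 : x = 5
      · subst h5; simp [ih]; split <;> [ring; rfl]
      · by_cases hbad : x = 3 ∨ x = 2
        · have : x = 2 ∨ x = 3 := hbad.symm
          simp [h5, hbad, this]
          omega
        · have : ¬ (x = 2 ∨ x = 3) := fun h => hbad h.symm
          simp [h5, hbad, this, ih]

theorem how_fives_char (w : List Int) :
    how_fives w = if icntb w = 0 then icnt5 w else 0 := by
  simpa using hf_char w 0

theorem winA_le_seven (xs : List Int) (i : Int) (h0 : 0 ≤ i) : winA xs i ≤ 7 := by
  rw [winA, PySem.List.slice_toNat xs h0 (by omega), how_fives_char]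
  have h7 : (i + 7).toNat - i.toNat = 7 := by omega
  split
  · refine le_trans (icnt5_le_length _) ?_
    rw [h7]
    exact_mod_cast List.length_take_le 7 (xs.drop i.toNat)
  · omega

theorem winA_zero_of_ge (xs : List Int) (i : Int) (h : (xs.length : Int) ≤ i) : winA xs i = 0 := by
  have h0 : 0 ≤ i := le_trans (by positivity) h
  rw [winA, PySem.List.slice_toNat xs h0 (by omega)]
  have : xs.drop i.toNat = [] := List.drop_eq_nil_of_le (by omega)
  simp [this, how_fives, how_fives_loop]

theorem fmax_seven (xs l : List Int) (hl : ∀ i ∈ l, 0 ≤ i) : fmax xs l 7 = 7 := by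
  induction l with
  | nil => rfl
  | cons i l ih =>
      have h7 : max (winA xs i) 7 = 7 := max_eq_right (winA_le_seven xs i (hl i (by simp)))
      simp only [fmax, List.foldl_cons] at *
      rw [h7, ih (fun j hj => hl j (by simp [hj]))]

theorem le_fmax (xs l : List Int) (mx : Int) : mx ≤ fmax xs l mx := by
  induction l generalizing mx with
  | nil => exact le_refl mx
  | cons i l ih =>
      simp only [fmax, List.foldl_cons] at *
      exact le_trans (le_max_right _ _) (ih (max (winA xs i) mx))

theorem loopA_eq (xs l : List Int) (mx : Int) (hl : ∀ i ∈ l, 0 ≤ i) (h0 : 0 ≤ mx) :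
    fss_loopA xs l mx = fmax xs l mx := by
  induction l generalizing mx with
  | nil => rfl
  | cons i l ih =>
      simp only [fss_loopA, fmax, List.foldl_cons]
      by_cases h7 : max (how_fives (PySem.List.slice xs (some i) (some (i + 7)))) mx = 7
      · simp only [winA] at *
        rw [if_pos h7, h7]
        exact (fmax_seven xs l (fun j hj => hl j (by simp [hj]))).symm
      · rw [if_neg h7]
        exact ih (max (winA xs i) mx) (fun j hj => hl j (by simp [hj]))
          (le_trans h0 (le_max_right _ _))

theorem fmax_zero_tail (xs l : List Int) (mx : Int) (hl : ∀ i ∈ l, winA xs i = 0) (h0 : 0 ≤ mx) :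
    fmax xs l mx = mx := by
  induction l generalizing mx with
  | nil => rfl
  | cons i l ih =>
      simp only [fmax, List.foldl_cons] at *
      rw [hl i (by simp), max_eq_right h0]
      exact ih mx (fun j hj => hl j (by simp [hj])) h0

theorem build_spec (xs : List Int) (p5 pb : List Int) (s5 sb : Int) :
    xs.foldl fss_build (p5, pb, s5, sb) =
      (p5 ++ (List.range xs.length).map (fun k => s5 + icnt5 (xs.take (k + 1))),
       pb ++ (List.range xs.length).map (fun k => sb + icntb (xs.take (k + 1))),
       s5 + icnt5 xs, sb + icntb xs) := by
  induction xs generalizing p5 pb s5 sb with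
  | nil => simp [icnt5, icntb]
  | cons x t ih =>
      simp only [List.foldl_cons, fss_build]
      rw [ih]
      simp [List.range_succ_eq_map, List.map_map, Function.comp_def, List.take_succ_cons,
        icnt5, icntb, add_assoc, List.append_assoc]

theorem p5_getD (xs : List Int) (k : Nat) (hk : k ≤ xs.length) :
    (xs.foldl fss_build ([0], [0], 0, 0)).1.getD k 0 = icnt5 (xs.take k) := by
  rw [build_spec]
  dsimp only
  cases k with
  | zero => simp [icnt5]
  | succ k =>
      have hk' : k < xs.length := by omega
      rw [List.singleton_append, List.getD_cons_succ,
        List.getD_eq_getElem _ 0 (by simpa using hk')]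
      simp

theorem pb_getD (xs : List Int) (k : Nat) (hk : k ≤ xs.length) :
    (xs.foldl fss_build ([0], [0], 0, 0)).2.1.getD k 0 = icntb (xs.take k) := by
  rw [build_spec]
  dsimp only
  cases k with
  | zero => simp [icntb]
  | succ k =>
      have hk' : k < xs.length := by omega
      rw [List.singleton_append, List.getD_cons_succ,
        List.getD_eq_getElem _ 0 (by simpa using hk')]
      simp

theorem winA_char (xs : List Int) (i : Int) (h0 : 0 ≤ i) (hm : i < (xs.length : Int)) :
    winA xs i =
      if icntb (xs.take (min (i + 7) (xs.length : Int)).toNat) = icntb (xs.take i.toNat)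
      then icnt5 (xs.take (min (i + 7) (xs.length : Int)).toNat) - icnt5 (xs.take i.toNat)
      else 0 := by
  have he : (min (i + 7) (xs.length : Int)).toNat = min (i.toNat + 7) xs.length := by omega
  rw [winA, PySem.List.slice_toNat xs h0 (by omega), how_fives_char, he]
  have h7 : (i + 7).toNat - i.toNat = 7 := by omega
  rw [h7]
  have hje : i.toNat ≤ min (i.toNat + 7) xs.length := by omega
  have hsplit : xs.take (min (i.toNat + 7) xs.length) =
      xs.take i.toNat ++ (xs.drop i.toNat).take (min (i.toNat + 7) xs.length - i.toNat) := by
    conv_lhs => rw [show min (i.toNat + 7) xs.length = i.toNat + (min (i.toNat + 7) xs.length - i.toNat) by omega]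
    exact List.take_add ..
  have hw : (xs.drop i.toNat).take 7 = (xs.drop i.toNat).take (min (i.toNat + 7) xs.length - i.toNat) := by
    rw [List.take_eq_take_min, List.take_eq_take_min (i := min (i.toNat + 7) xs.length - i.toNat)]
    congr 1
    simp only [List.length_drop]
    omega
  rw [hw, hsplit, icntb_append, icnt5_append]
  have hb := icntb_nonneg ((xs.drop i.toNat).take (min (i.toNat + 7) xs.length - i.toNat))
  by_cases hc : icntb ((xs.drop i.toNat).take (min (i.toNat + 7) xs.length - i.toNat)) = 0
  · rw [if_pos hc, if_pos (by omega)]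
    omega
  · rw [if_neg hc, if_neg (by omega)]

theorem foldB_step (xs : List Int) (b i : Int) (h0 : 0 ≤ i) (hm : i < (xs.length : Int))
    (hb : 0 ≤ b) :
    (if PySem.List.pyGetD (xs.foldl fss_build ([0], [0], 0, 0)).2.1 (min (i + 7) (xs.length : Int)) 0 =
          PySem.List.pyGetD (xs.foldl fss_build ([0], [0], 0, 0)).2.1 i 0
      then max b (PySem.List.pyGetD (xs.foldl fss_build ([0], [0], 0, 0)).1 (min (i + 7) (xs.length : Int)) 0 -
                  PySem.List.pyGetD (xs.foldl fss_build ([0], [0], 0, 0)).1 i 0)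
      else b) = max (winA xs i) b := by
  have h0e : (0 : Int) ≤ min (i + 7) (xs.length : Int) := by omega
  have hge : ∀ (L : List Int) (j : Int), 0 ≤ j → PySem.List.pyGetD L j 0 = L.getD j.toNat 0 := by
    intro L j hj
    rw [show j = ((j.toNat : Nat) : Int) by omega, PySem.List.pyGetD_natCast]
    rw [show (((j.toNat : Nat) : Int)).toNat = j.toNat by omega]
  rw [hge _ _ h0e, hge _ _ h0, hge _ _ h0e, hge _ _ h0,
    p5_getD xs _ (by omega), p5_getD xs _ (by omega),
    pb_getD xs _ (by omega), pb_getD xs _ (by omega),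
    winA_char xs i h0 hm]
  split
  · exact max_comm ..
  · exact (max_eq_right hb).symm

theorem foldB_eq (xs l : List Int) (b : Int)
    (hmem : ∀ i ∈ l, 0 ≤ i ∧ i < (xs.length : Int)) (hb : 0 ≤ b) :
    l.foldl (fun best i =>
      if PySem.List.pyGetD (xs.foldl fss_build ([0], [0], 0, 0)).2.1 (min (i + 7) (xs.length : Int)) 0 =
          PySem.List.pyGetD (xs.foldl fss_build ([0], [0], 0, 0)).2.1 i 0
      then max best (PySem.List.pyGetD (xs.foldl fss_build ([0], [0], 0, 0)).1 (min (i + 7) (xs.length : Int)) 0 -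
                     PySem.List.pyGetD (xs.foldl fss_build ([0], [0], 0, 0)).1 i 0)
      else best) b = fmax xs l b := by
  induction l generalizing b with
  | nil => rfl
  | cons i l ih =>
      obtain ⟨h0, hm⟩ := hmem i (by simp)
      simp only [fmax, List.foldl_cons]
      rw [foldB_step xs b i h0 hm hb]
      exact ih (max (winA xs i) b) (fun j hj => hmem j (by simp [hj]))
        (le_trans hb (le_max_right _ _))

-- ===== VERDICT (by name: the statement is the Claim_ definition above) =====
theorem find_special_segment_spec : Claim_equal_find_special_segment := by
  intro n grades _
  unfold Spec_find_special_segment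
  simp only [find_special_segment, find_special_segment_alt]
  by_cases hn : n ≤ 6
  · simp [hn]
  · simp only [if_neg hn]
    have hrange : PySem.List.pyRange 0 (n - 7 + 1) 1 = PySem.List.pyRange 0 (n - 6) 1 := by
      rw [show n - 7 + 1 = n - 6 by ring]
    have hloop : fss_loopA grades (PySem.List.pyRange 0 (n - 7 + 1) 1) 0 =
        fmax grades (PySem.List.pyRange 0 (n - 6) 1) 0 := by
      rw [hrange]
      exact loopA_eq _ _ 0 (fun i hi => (PySem.List.mem_pyRange_one.1 hi).1) le_rfl
    have hmain : fmax grades (PySem.List.pyRange 0 (n - 6) 1) 0 =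
        (PySem.List.pyRange 0 (min (n - 6) (grades.length : Int)) 1).foldl
          (fun best i =>
            if PySem.List.pyGetD (grades.foldl fss_build ([0], [0], 0, 0)).2.1
                  (min (i + 7) (grades.length : Int)) 0 =
                PySem.List.pyGetD (grades.foldl fss_build ([0], [0], 0, 0)).2.1 i 0
            then max best (PySem.List.pyGetD (grades.foldl fss_build ([0], [0], 0, 0)).1
                  (min (i + 7) (grades.length : Int)) 0 -
                PySem.List.pyGetD (grades.foldl fss_build ([0], [0], 0, 0)).1 i 0)
            else best) 0 := by
      rcases le_or_gt (n - 6) (grades.length : Int) with hle | hlt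
      · rw [min_eq_left hle,
          foldB_eq grades _ 0 (fun i hi => ⟨(PySem.List.mem_pyRange_one.1 hi).1,
            lt_of_lt_of_le (PySem.List.mem_pyRange_one.1 hi).2 hle⟩) le_rfl]
      · rw [min_eq_right (le_of_lt hlt),
          PySem.List.pyRange_one_append 0 (grades.length : Int) (n - 6) (by positivity)
            (le_of_lt hlt)]
        simp only [fmax, List.foldl_append]
        have htail : ∀ i ∈ PySem.List.pyRange (grades.length : Int) (n - 6) 1,
            winA grades i = 0 := fun i hi =>
          winA_zero_of_ge grades i (PySem.List.mem_pyRange_one.1 hi).1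
        rw [show (List.foldl (fun m i => max (winA grades i) m)
              (List.foldl (fun m i => max (winA grades i) m) 0
                (PySem.List.pyRange 0 (grades.length : Int) 1))
              (PySem.List.pyRange (grades.length : Int) (n - 6) 1)) =
            fmax grades (PySem.List.pyRange (grades.length : Int) (n - 6) 1)
              (fmax grades (PySem.List.pyRange 0 (grades.length : Int) 1) 0) from rfl,
          fmax_zero_tail _ _ _ htail (le_fmax grades _ 0),
          foldB_eq grades _ 0 (fun i hi => ⟨(PySem.List.mem_pyRange_one.1 hi).1,
            (PySem.List.mem_pyRange_one.1 hi).2⟩) le_rfl]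
    rw [hloop, hmain]
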